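-- pv_equiv track=rewrite | github.com/vatsalcode/LLM_Transformer_Queue | Abhishek Tyagi/sortingprob.py | sort2types
-- ===== SOURCE A (Python) =====
-- def sort2types(arr):
--     p = max(arr)
--     i = -1
--     for j in range(len(arr)):
--         if arr[j] < p:
--             arr[i + 1], arr[j] = arr[j], arr[i + 1]
--             i += 1
--     return arr
-- ===== SOURCE B (Python) =====
-- def sort2types(arr):
--     p = max(arr)
--     front = [x for x in arr if x < p]
--     arr[:] = front + [p] * (len(arr) - len(front))
--     return arr
-- ===== Notes on version B (the rewrite author's own statement) =====
-- stated objective: simpler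
-- what changed: Replaces the in-place two-pointer swap partition with filter-and-reconstruct: B keeps the elements below the max and regenerates the tail as [p]*count (valid because every non-less element equals the max), instead of swapping pairs.
import Mathlib
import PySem

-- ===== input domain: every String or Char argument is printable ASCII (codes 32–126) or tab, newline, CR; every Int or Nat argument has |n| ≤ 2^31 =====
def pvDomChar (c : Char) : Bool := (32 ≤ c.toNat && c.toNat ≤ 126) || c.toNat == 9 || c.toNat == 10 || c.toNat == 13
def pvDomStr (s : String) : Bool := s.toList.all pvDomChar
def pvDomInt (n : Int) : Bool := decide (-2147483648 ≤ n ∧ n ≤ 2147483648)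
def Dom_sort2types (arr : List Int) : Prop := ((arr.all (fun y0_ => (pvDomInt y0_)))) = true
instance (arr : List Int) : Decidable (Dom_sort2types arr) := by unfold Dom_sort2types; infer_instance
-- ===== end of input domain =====

-- B replaces A's two-pointer swap partition by filter-and-reconstruct (front of elements < max, tail rebuilt as copies of the max).
-- Equivalence is about the RETURN value; both Pythons also mutate arr in place to the same contents.

-- ===== PORT A =====
-- one loop iteration: 'if arr[j] < p: arr[i+1], arr[j] = arr[j], arr[i+1]; i += 1'
def sort2typesStep (p : Int) (st : List Int × Int) (j : Int) : List Int × Int :=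
  let l := st.1
  let i := st.2
  if PySem.List.pyGetD l j 0 < p then
    let a := PySem.List.pyGetD l j 0          -- RHS tuple evaluated first
    let b := PySem.List.pyGetD l (i + 1) 0
    (PySem.List.pySetD (PySem.List.pySetD l (i + 1) a) j b, i + 1)
  else (l, i)

def sort2types (arr : List Int) : List Int :=
  match PySem.List.max? arr (fun x => x) with
  | none => arr   -- Python raises ValueError here (max of empty list); excluded by Pre_
  | some p =>
      ((PySem.List.pyRange 0 arr.length 1).foldl (sort2typesStep p) (arr, -1)).1

-- ===== PORT B =====
def sort2types_alt (arr : List Int) : List Int :=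
  match PySem.List.max? arr (fun x => x) with
  | none => arr   -- Python raises ValueError here; excluded by Pre_
  | some p =>
      let front := arr.filter (fun x => decide (x < p))
      front ++ List.replicate (arr.length - front.length) p

-- ===== PRECONDITION & SPEC =====
-- Pre_ excludes only the empty list, on which both A and B raise ValueError (max of an empty sequence).
def Pre_sort2types (arr : List Int) : Prop := arr ≠ []
instance (arr : List Int) : Decidable (Pre_sort2types arr) := by unfold Pre_sort2types; infer_instance
def pvWitness_sort2types : List Int := ([3, 1, 3, 2] : List Int)

def Spec_sort2types (arr : List Int) (out : List Int) : Prop := out = sort2types_alt arr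
instance (arr : List Int) (out : List Int) : Decidable (Spec_sort2types arr out) := by unfold Spec_sort2types; infer_instance

-- ===== CLAIM (what is proved, stated in full; the proofs are below) =====
def Claim_equal_sort2types : Prop := ∀ (arr : List Int), Dom_sort2types arr → Pre_sort2types arr → Spec_sort2types arr (sort2types arr)

-- ===== LEMMAS AND PROOFS =====

-- setting/reading position k = F.length of F ++ ys edits/reads the head of ys
theorem pv_set_at {α : Type} (F ys : List α) (k : Nat) (h : k = F.length) (v : α) :
    (F ++ ys).set k v = F ++ ys.set 0 v := by
  subst h
  induction F with
  | nil => simp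
  | cons a t ih => simp [ih]

theorem pv_getD_at {α : Type} (F ys : List α) (k : Nat) (h : k = F.length) (d : α) :
    (F ++ ys).getD k d = ys.getD 0 d := by
  subst h
  induction F with
  | nil => simp
  | cons a t ih => simpa using ih

-- loop invariant: processing indices F.length+m … n-1 on F ++ p^m ++ rest with i = |F|-1
theorem pv_loop_inv (p : Int) (rest : List Int) : ∀ (F : List Int) (m : Nat),
    (∀ x ∈ rest, x ≤ p) →
    ((PySem.List.pyRange ((F.length : Int) + m) ((F.length : Int) + m + rest.length) 1).foldl
        (sort2typesStep p) (F ++ List.replicate m p ++ rest, (F.length : Int) - 1)).1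
      = F ++ rest.filter (fun x => decide (x < p))
          ++ List.replicate (m + rest.length - (rest.filter (fun x => decide (x < p))).length) p := by
  induction rest with
  | nil =>
      intro F m _
      simp [PySem.List.pyRange_one_eq_nil]
  | cons x t ih =>
      intro F m hle
      have hxle : x ≤ p := hle x (by simp)
      rw [PySem.List.pyRange_one_cons (by push_cast [List.length_cons]; omega)]
      simp only [List.foldl_cons]
      have hlenFR : F.length + m = (F ++ List.replicate m p).length := by simp
      have hidx : ((F.length : Int) + (m : Nat)) = (((F.length + m : Nat)) : Int) := by
        push_cast; ring
      have hget : PySem.List.pyGetD (F ++ List.replicate m p ++ x :: t) ((F.length : Int) + m) 0 = x := by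
        rw [hidx, PySem.List.pyGetD_natCast, pv_getD_at (F ++ List.replicate m p) _ _ hlenFR]
        rfl
      have hstep : sort2typesStep p (F ++ List.replicate m p ++ x :: t, (F.length : Int) - 1)
          ((F.length : Int) + m) =
          if x < p then ((F ++ [x]) ++ List.replicate m p ++ t, ((F ++ [x]).length : Int) - 1)
          else (F ++ List.replicate (m + 1) p ++ t, (F.length : Int) - 1) := by
        by_cases hx : x < p
        · simp only [sort2typesStep, hget, if_pos hx]
          have h1 : ((F.length : Int) - 1 + 1) = ((F.length : Nat) : Int) := by omega
          rw [h1, hidx, PySem.List.pyGetD_natCast, PySem.List.pySetD_natCast,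
            PySem.List.pySetD_natCast]
          cases m with
          | zero =>
              have hb : (F ++ List.replicate 0 p ++ x :: t).getD F.length 0 = x := by
                rw [pv_getD_at (F ++ List.replicate 0 p) _ _ (by simp)]; rfl
              rw [hb, pv_set_at (F ++ List.replicate 0 p) _ _ (by simp)]
              rw [show ((x :: t).set 0 x) = x :: t from rfl]
              rw [pv_set_at (F ++ List.replicate 0 p) _ _ (by simp)]
              simp
          | succ k =>
              have hb : (F ++ List.replicate (k+1) p ++ x :: t).getD F.length 0 = p := by
                rw [show F ++ List.replicate (k+1) p ++ x :: t
                      = F ++ (List.replicate (k+1) p ++ x :: t) from by simp,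
                  pv_getD_at F _ _ rfl]
                rfl
              rw [hb]
              rw [show F ++ List.replicate (k+1) p ++ x :: t
                    = F ++ (List.replicate (k+1) p ++ x :: t) from by simp,
                pv_set_at F _ _ rfl]
              rw [show (List.replicate (k+1) p ++ x :: t).set 0 x
                    = x :: (List.replicate k p ++ x :: t) from by
                  simp [List.replicate_succ]]
              rw [show F ++ x :: (List.replicate k p ++ x :: t)
                    = (F ++ [x] ++ List.replicate k p) ++ x :: t from by simp,
                pv_set_at (F ++ [x] ++ List.replicate k p) _ _ (by simp)]
              rw [show ((x :: t).set 0 p) = p :: t from rfl]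
              simp only [Prod.mk.injEq]
              refine ⟨?_, ?_⟩
              · simp [List.replicate_succ' (n := k), List.append_assoc]
              · simp
        · simp only [sort2typesStep, hget, if_neg hx]
          have hxp : x = p := by omega
          subst hxp
          simp [List.replicate_succ' (n := m), List.append_assoc]
      rw [hstep]
      by_cases hx : x < p
      · rw [if_pos hx]
        have e2 : ((F.length : Int) + m + (x :: t).length) = (((F ++ [x]).length : Int) + m + t.length) := by
          simp
          ring
        rw [e2]
        have hrec := ih (F ++ [x]) m (fun y hy => hle y (by simp [hy]))
        rw [show (((F ++ [x]).length : Int) + m) = ((F.length : Int) + m + 1) from by simp; ring] at hrec ⊢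
        rw [hrec]
        have hfl : (t.filter (fun y => decide (y < p))).length ≤ t.length := List.length_filter_le _ _
        simp [List.filter, hx, List.append_assoc]
        omega
      · rw [if_neg hx]
        have e : ((F.length : Int) + m + (x :: t).length) = ((F.length : Int) + (m+1 : Nat) + t.length) := by
          simp
          ring
        have e1 : ((F.length : Int) + m + 1) = ((F.length : Int) + ((m+1 : Nat) : Int)) := by push_cast; ring
        rw [e, e1, ih F (m+1) (fun y hy => hle y (by simp [hy]))]
        have hfl : (t.filter (fun y => decide (y < p))).length ≤ t.length := List.length_filter_le _ _
        simp [List.filter, hx]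
        congr 1
        omega

-- ===== VERDICT (by name: the statement is the Claim_ definition above) =====
theorem sort2types_spec : Claim_equal_sort2types := by
  intro arr _ hpre
  unfold Spec_sort2types sort2types sort2types_alt
  cases hmax : PySem.List.max? arr (fun x => x) with
  | none => rfl
  | some p =>
      have hle : ∀ y ∈ arr, y ≤ p := by
        intro y hy
        exact PySem.List.max?_isMax hmax y hy
      have := pv_loop_inv p arr [] 0 hle
      simpa using this
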